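-- pv_equiv track=rewrite | github.com/noahostle/SPEAR | Attacks/full_key_recovery/test_state_recovery.py | sampled_diff_score
-- ===== SOURCE A (Python) =====
-- from typing import Dict, List, Optional, Sequence, Tuple
--
-- def sampled_diff_score(table: Sequence[int], diffs: Sequence[int], sample_x: Sequence[int]) -> int:
--     total = 0
--     for diff in diffs:
--         counts: Dict[int, int] = {}
--         for x in sample_x:
--             out_diff = (table[(x + diff) & 0xFFFF] - table[x]) & 0xFFFF
--             counts[out_diff] = counts.get(out_diff, 0) + 1
--         total += max(counts.values())
--     return total
-- ===== SOURCE B (Python) =====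
-- def sampled_diff_score(table, diffs, sample_x):
--     # Sort-then-scan mode finding instead of hash counting.
--     total = 0
--     for diff in diffs:
--         outs = sorted(((table[(x + diff) & 0xFFFF] - table[x]) & 0xFFFF) for x in sample_x)
--         best = 0
--         run = 0
--         prev = None
--         for o in outs:
--             if prev is not None and o == prev:
--                 run = run + 1
--             else:
--                 run = 1
--             if run > best:
--                 best = run
--             prev = o
--         total += best
--     return total
-- ===== Notes on version B (the rewrite author's own statement) =====
-- stated objective: alternative
-- what changed: Per diff, replaces the hash-map counter with sorting the out_diff list and linearly scanning it for the longest run of equal values (sort-then-scan mode finding), with no dictionary at all.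
import Mathlib
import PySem

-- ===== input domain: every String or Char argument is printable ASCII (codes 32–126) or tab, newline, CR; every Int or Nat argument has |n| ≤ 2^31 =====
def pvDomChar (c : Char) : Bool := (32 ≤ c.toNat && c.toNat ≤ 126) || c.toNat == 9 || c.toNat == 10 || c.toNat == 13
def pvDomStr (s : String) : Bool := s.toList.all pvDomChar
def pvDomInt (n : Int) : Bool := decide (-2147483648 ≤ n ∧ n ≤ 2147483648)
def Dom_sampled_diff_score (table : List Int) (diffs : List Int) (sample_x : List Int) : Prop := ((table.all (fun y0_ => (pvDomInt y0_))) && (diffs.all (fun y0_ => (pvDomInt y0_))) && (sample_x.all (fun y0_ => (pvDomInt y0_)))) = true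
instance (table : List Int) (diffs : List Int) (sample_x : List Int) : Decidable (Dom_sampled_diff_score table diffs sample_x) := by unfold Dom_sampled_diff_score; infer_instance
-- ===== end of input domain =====

-- B replaces A's per-diff hash counting with sort-then-scan longest-run mode finding (alternative algorithm, not faster).

-- shared arithmetic helper: (table[(x + diff) & 0xFFFF] - table[x]) & 0xFFFF  (identical expression in both Pythons)
def pvOutDiff (table : List Int) (diff : Int) (x : Int) : Int :=
  PySem.Int.band
    (PySem.List.pyGetD table (PySem.Int.band (x + diff) 65535) 0 - PySem.List.pyGetD table x 0)
    65535

-- ===== PORT A =====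
def sampled_diff_score (table : List Int) (diffs : List Int) (sample_x : List Int) : Int :=
  diffs.foldl (fun total diff =>
    let counts : PySem.Dict Int Int :=
      sample_x.foldl (fun d x =>
        let od := pvOutDiff table diff x
        d.insert od (d.getD od 0 + 1)) PySem.Dict.empty
    total + (PySem.List.max? counts.values (fun v => v)).getD 0) 0

-- ===== PORT B =====
-- scan step: run-length update for one element of the sorted list (best, run, prev)
def pvStepB (st : Int × Int × Option Int) (o : Int) : Int × Int × Option Int :=
  let run : Int := match st.2.2 with
    | some p => if o = p then st.2.1 + 1 else 1
    | none => 1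
  (if run > st.1 then run else st.1, run, some o)

def sampled_diff_score_alt (table : List Int) (diffs : List Int) (sample_x : List Int) : Int :=
  diffs.foldl (fun total diff =>
    let outs := PySem.List.sorted (sample_x.map (fun x => pvOutDiff table diff x)) (fun v => v) false
    total + (outs.foldl pvStepB ((0 : Int), (0 : Int), (none : Option Int))).1) 0

-- ===== PRECONDITION & SPEC =====
-- Pre_ excludes exactly the inputs where the Python A raises: empty sample_x with non-empty diffs
-- (ValueError from max() on an empty dict) and out-of-range table indices (IndexError).
def Pre_sampled_diff_score (table : List Int) (diffs : List Int) (sample_x : List Int) : Prop :=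
  (diffs = [] ∨ sample_x ≠ []) ∧
  ∀ diff ∈ diffs, ∀ x ∈ sample_x,
    PySem.Raise.InRange table.length x ∧ PySem.Int.band (x + diff) 65535 < (table.length : Int)
instance (table : List Int) (diffs : List Int) (sample_x : List Int) : Decidable (Pre_sampled_diff_score table diffs sample_x) := by unfold Pre_sampled_diff_score; infer_instance

def pvWitness_sampled_diff_score : List Int × List Int × List Int := ([5], [0], [0])

def Spec_sampled_diff_score (table : List Int) (diffs : List Int) (sample_x : List Int) (out : Int) : Prop := out = sampled_diff_score_alt table diffs sample_x
instance (table : List Int) (diffs : List Int) (sample_x : List Int) (out : Int) : Decidable (Spec_sampled_diff_score table diffs sample_x out) := by unfold Spec_sampled_diff_score; infer_instance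

-- ===== CLAIM (what is proved, stated in full; the proofs are below) =====
def Claim_equal_sampled_diff_score : Prop := ∀ (table : List Int) (diffs : List Int) (sample_x : List Int), Dom_sampled_diff_score table diffs sample_x → Pre_sampled_diff_score table diffs sample_x → Spec_sampled_diff_score table diffs sample_x (sampled_diff_score table diffs sample_x)

-- ===== LEMMAS AND PROOFS =====

-- "m is the maximal multiplicity in l"
def pvMode (l : List Int) (m : Int) : Prop :=
  (∃ v ∈ l, m = (l.count v : Int)) ∧ ∀ v ∈ l, (l.count v : Int) ≤ m

theorem pvMode_unique {l : List Int} {m m' : Int} (h : pvMode l m) (h' : pvMode l m') : m = m' := by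
  obtain ⟨⟨v, hv, rfl⟩, hle⟩ := h
  obtain ⟨⟨v', hv', rfl⟩, hle'⟩ := h'
  exact le_antisymm (hle' v hv) (hle v' hv')

-- A side: the max of the counter's values is the maximal multiplicity
theorem pvMode_A (l : List Int) (hne : l ≠ []) :
    pvMode l ((PySem.List.max? (PySem.Dict.counter l).values (fun v => v)).getD 0) := by
  have hvals : (PySem.Dict.counter l).values = (PySem.Set.ofList l).map (fun k => (l.count k : Int)) := by
    simp [PySem.Dict.values, PySem.Dict.items_counter]
  obtain ⟨a, t, rfl⟩ := List.exists_cons_of_ne_nil hne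
  have ha : a ∈ PySem.Set.ofList (a :: t) := by
    rw [PySem.Set.mem_ofList]; exact List.mem_cons_self
  have hvne : (PySem.Dict.counter (a :: t)).values ≠ [] := by
    rw [hvals]
    exact List.ne_nil_of_mem (List.mem_map_of_mem ha)
  obtain ⟨m, hm⟩ : ∃ m, PySem.List.max? (PySem.Dict.counter (a :: t)).values (fun v => v) = some m := by
    cases hmx : PySem.List.max? (PySem.Dict.counter (a :: t)).values (fun v => v) with
    | none => exact absurd ((PySem.List.max?_eq_none_iff _ _).mp hmx) hvne
    | some m => exact ⟨m, rfl⟩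
  rw [hm]
  constructor
  · have := PySem.List.max?_mem hm
    rw [hvals, List.mem_map] at this
    obtain ⟨k, hk, hkm⟩ := this
    exact ⟨k, (PySem.Set.mem_ofList _ _).mp hk, hkm.symm⟩
  · intro v hv
    have hvset : ((a :: t).count v : Int) ∈ (PySem.Dict.counter (a :: t)).values := by
      rw [hvals, List.mem_map]
      exact ⟨v, (PySem.Set.mem_ofList _ _).mpr hv, rfl⟩
    exact PySem.List.max?_isMax hm _ hvset

-- in a ≤-sorted list every element is ≤ the last one
theorem pv_le_getLast : ∀ (t : List Int), t.Pairwise (· ≤ ·) → ∀ lst, t.getLast? = some lst → ∀ a ∈ t, a ≤ lst := by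
  intro t
  induction t with
  | nil => intro _ lst h; simp at h
  | cons a t ih =>
    intro hp lst hlast b hb
    rcases List.pairwise_cons.mp hp with ⟨hale, hpt⟩
    cases t with
    | nil =>
      simp at hlast hb; omega
    | cons c u =>
      have hlast2 : (c :: u).getLast? = some lst := by
        rw [List.getLast?_cons_cons] at hlast; exact hlast
      rcases List.mem_cons.mp hb with rfl | hbt
      · exact le_trans (hale c List.mem_cons_self) (ih hpt lst hlast2 c List.mem_cons_self)
      · exact ih hpt lst hlast2 b hbt

-- the scan invariant, by induction from the right
theorem pvScan_inv : ∀ (s : List Int), s.Pairwise (· ≤ ·) → s ≠ [] →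
    ∃ b lst, s.foldl pvStepB ((0 : Int), (0 : Int), (none : Option Int)) = (b, (s.count lst : Int), some lst)
      ∧ s.getLast? = some lst ∧ pvMode s b := by
  intro s
  induction s using List.reverseRecOn with
  | nil => intro _ h; exact absurd rfl h
  | append_singleton t o ih =>
    intro hp _
    have hpt : t.Pairwise (· ≤ ·) := hp.sublist (List.sublist_append_left t [o])
    have hto : ∀ a ∈ t, a ≤ o := by
      intro a ha
      have := (List.pairwise_append.mp hp).2.2
      exact this a ha o List.mem_cons_self
    rw [List.foldl_append]
    cases ht : t with
    | nil =>
      subst ht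
      refine ⟨1, o, ?_, by simp, ⟨o, by simp, by simp⟩, ?_⟩
      · simp [pvStepB]
      · intro v hv; simp at hv; subst hv; simp
    | cons c u =>
      rw [← ht]
      have htne : t ≠ [] := by rw [ht]; simp
      obtain ⟨b, lst, hfold, hlast, ⟨⟨v0, hv0, hbv0⟩, hble⟩⟩ := ih hpt htne
      have hlstt : lst ∈ t := List.mem_of_getLast? hlast
      have hlelst : ∀ a ∈ t, a ≤ lst := pv_le_getLast t hpt lst hlast
      have hlast' : (t ++ [o]).getLast? = some o := by simp
      have hco : ∀ w : Int, ((t ++ [o]).count w : Int) = (t.count w : Int) + (if o = w then 1 else 0) := by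
        intro w; by_cases h : o = w <;> simp [List.count_append, h]
      rw [hfold]
      by_cases ho : o = lst
      · -- o equals the last element: the run extends
        subst ho
        have hcnt : ((t ++ [o]).count o : Int) = (t.count o : Int) + 1 := by
          rw [hco o]; simp
        refine ⟨if (t.count o : Int) + 1 > b then (t.count o : Int) + 1 else b, o, ?_, hlast', ?_, ?_⟩
        · simp [pvStepB]
        · by_cases hgt : (t.count o : Int) + 1 > b
          · exact ⟨o, by simp, by simp [hgt]⟩
          · refine ⟨v0, by simp [hv0], ?_⟩
            have hv0o : ¬ (o = v0) := by
              intro h; rw [← h] at hbv0; omega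
            rw [hco v0, if_neg hv0o]; omega
        · intro v hv
          rw [hco v]
          by_cases hvo : o = v
          · rw [if_pos hvo, ← hvo]; split <;> omega
          · have hvt : v ∈ t := by
              rcases List.mem_append.mp hv with h | h
              · exact h
              · simp at h; exact absurd h.symm hvo
            have := hble v hvt
            rw [if_neg hvo]; split <;> omega
      · -- o is new (strictly greater than everything in t): run restarts at 1
        have honot : o ∉ t := by
          intro hmem
          exact ho (le_antisymm (hlelst o hmem) (hto lst hlstt))
        have hb1 : 1 ≤ b := by
          have : 0 < t.count v0 := List.count_pos_iff.mpr hv0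
          omega
        have hzero : (t.count o : Int) = 0 := by
          rw [List.count_eq_zero_of_not_mem honot]; simp
        refine ⟨b, o, ?_, hlast', ?_, ?_⟩
        · have hcnt : ((t ++ [o]).count o : Int) = 1 := by rw [hco o]; simp [hzero]
          have hng : ¬ ((1 : Int) > b) := by omega
          simp [pvStepB, ho, hng]
          omega
        · refine ⟨v0, by simp [hv0], ?_⟩
          have hv0o : ¬ (o = v0) := fun h => honot (h ▸ hv0)
          rw [hco v0, if_neg hv0o]; omega
        · intro v hv
          rw [hco v]
          by_cases hvo : o = v
          · rw [if_pos hvo, ← hvo]; omega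
          · have hvt : v ∈ t := by
              rcases List.mem_append.mp hv with h | h
              · exact h
              · simp at h; exact absurd h.symm hvo
            have := hble v hvt
            rw [if_neg hvo]; omega

-- B side: the best run over the sorted list is the maximal multiplicity of the original list
theorem pvMode_B (l : List Int) (hne : l ≠ []) :
    pvMode l (((PySem.List.sorted l (fun v => v) false).foldl pvStepB ((0 : Int), (0 : Int), (none : Option Int))).1) := by
  set s := PySem.List.sorted l (fun v => v) false with hs
  have hperm : s.Perm l := PySem.List.sorted_perm l (fun v => v) false
  have hsp : s.Pairwise (· ≤ ·) := by
    simpa using PySem.List.sorted_pairwise (xs := l) (key := fun v : Int => v)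
  have hsne : s ≠ [] := by
    rw [hs, Ne, PySem.List.sorted_eq_nil_iff]; exact hne
  obtain ⟨b, lst, hfold, _, ⟨⟨v0, hv0, hbv0⟩, hble⟩⟩ := pvScan_inv s hsp hsne
  rw [hfold]
  constructor
  · exact ⟨v0, hperm.mem_iff.mp hv0, by rw [hbv0, hperm.count_eq]⟩
  · intro v hv
    have := hble v (hperm.mem_iff.mpr hv)
    rwa [hperm.count_eq] at this

-- per-diff equality of the two inner computations
theorem pvInner_eq (table : List Int) (diff : Int) (sample_x : List Int) (hne : sample_x ≠ []) :
    (PySem.List.max?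
      (sample_x.foldl (fun d x =>
        let od := pvOutDiff table diff x
        d.insert od (d.getD od 0 + 1)) (PySem.Dict.empty : PySem.Dict Int Int)).values (fun v => v)).getD 0
    = ((PySem.List.sorted (sample_x.map (fun x => pvOutDiff table diff x)) (fun v => v) false).foldl
        pvStepB ((0 : Int), (0 : Int), (none : Option Int))).1 := by
  set l := sample_x.map (fun x => pvOutDiff table diff x) with hl
  have hlne : l ≠ [] := by
    rw [hl]; simpa using hne
  have hdict :
      sample_x.foldl (fun d x =>
        let od := pvOutDiff table diff x
        d.insert od (d.getD od 0 + 1)) (PySem.Dict.empty : PySem.Dict Int Int)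
      = PySem.Dict.counter l := by
    rw [hl, ← PySem.Dict.foldl_insert_getD_add_one_eq_counter, List.foldl_map]
  rw [hdict]
  exact pvMode_unique (pvMode_A l hlne) (pvMode_B l hlne)

-- ===== VERDICT (by name: the statement is the Claim_ definition above) =====
theorem sampled_diff_score_spec : Claim_equal_sampled_diff_score := by
  intro table diffs sample_x _ hpre
  unfold Spec_sampled_diff_score sampled_diff_score sampled_diff_score_alt
  rcases hpre with ⟨hne, _⟩
  rcases hne with rfl | hne
  · rfl
  · apply PySem.List.foldl_congr_mem
    intro total diff _
    exact congrArg (fun z => total + z) (pvInner_eq table diff sample_x hne)
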